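-- pv_equiv track=rewrite | github.com/hojoungjang/programming-exercises | 17413-단어-뒤집기-2/solution.py | solution
-- ===== SOURCE A (Python) =====
-- def solution(s):
--     new_s = []
--
--     i = 0
--     while i < len(s):
--         if s[i] == "<":
--             new_s.append(s[i])
--             i += 1
--             while i < len(s) and s[i-1] != ">":
--                 new_s.append(s[i])
--                 i += 1
--         elif s[i] == " ":
--             new_s.append(s[i])
--             i += 1
--         else:
--             stack = []
--             while i < len(s) and s[i] not in [" ", "<"]:
--                 stack.append(s[i])
--                 i += 1
--             while stack:
--                 new_s.append(stack.pop())
--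
--     return "".join(new_s)
-- ===== SOURCE B (Python) =====
-- def solution(s):
--     out = []
--     i = 0
--     n = len(s)
--     while i < n:
--         if s[i] == '<':
--             j = s.find('>', i)
--             j = n if j == -1 else j + 1
--             out.append(s[i:j])
--         else:
--             j = s.find('<', i)
--             if j == -1:
--                 j = n
--             out.append(' '.join(w[::-1] for w in s[i:j].split(' ')))
--         i = j
--     return ''.join(out)
-- ===== Notes on version B (the rewrite author's own statement) =====
-- stated objective: faster
-- what changed: Replaced A's char-by-char index state machine (per-char stack pushes/pops for word reversal, prev-char tag loop) by a tokenizer that uses str.find to cut the string into whole tag / non-tag segments and reverses the words of a non-tag segment with split/slicing/join.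
import Mathlib
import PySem

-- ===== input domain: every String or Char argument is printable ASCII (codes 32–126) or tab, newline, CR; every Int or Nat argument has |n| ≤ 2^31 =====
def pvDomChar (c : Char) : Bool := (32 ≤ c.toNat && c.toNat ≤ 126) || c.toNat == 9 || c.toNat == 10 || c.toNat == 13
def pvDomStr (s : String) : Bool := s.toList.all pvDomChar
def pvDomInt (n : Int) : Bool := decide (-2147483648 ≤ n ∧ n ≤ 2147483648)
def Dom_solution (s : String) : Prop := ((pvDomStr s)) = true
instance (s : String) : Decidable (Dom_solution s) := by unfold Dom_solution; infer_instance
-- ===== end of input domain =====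

-- B tokenizes the string into tag / non-tag segments and reverses words by split-map-join,
-- replacing A's char-by-char index state machine with a stack; same O(n) asymptotics, measurably faster constants (bulk str.find/split/slice instead of per-char Python steps).

-- ===== PORT A =====
-- inner tag loop: `while i < len(s) and s[i-1] != ">": append s[i]` — carries the previous char
def goTag (prev : Char) : List Char → List Char × List Char
  | [] => ([], [])
  | c :: rest =>
    if prev ≠ '>' then
      let p := goTag c rest
      (c :: p.1, p.2)
    else ([], c :: rest)

lemma goTag_len (prev : Char) (l : List Char) : (goTag prev l).2.length ≤ l.length := by
  induction l generalizing prev with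
  | nil => simp [goTag]
  | cons c r ih =>
    simp only [goTag]
    split
    · exact (ih c).trans (Nat.le_succ _)
    · simp

-- inner word loop: pushes the run of non-space non-'<' chars onto a stack
def goWord : List Char → List Char × List Char
  | [] => ([], [])
  | c :: rest =>
    if c ≠ ' ' ∧ c ≠ '<' then
      let p := goWord rest
      (c :: p.1, p.2)
    else ([], c :: rest)

lemma goWord_len (l : List Char) : (goWord l).2.length ≤ l.length := by
  induction l with
  | nil => simp [goWord]
  | cons c r ih =>
    simp only [goWord]
    split
    · exact ih.trans (Nat.le_succ _)
    · simp

-- A's outer while loop over the index, as structural recursion on the remaining chars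
def goA : List Char → List Char
  | [] => []
  | c :: rest =>
    if c = '<' then
      c :: (goTag c rest).1 ++ goA ((goTag c rest).2)
    else if c = ' ' then
      c :: goA rest
    else
      (goWord (c :: rest)).1.reverse ++ goA ((goWord (c :: rest)).2)
termination_by l => l.length
decreasing_by
  · exact Nat.lt_succ_of_le (goTag_len _ _)
  · exact Nat.lt_succ_of_le (Nat.le_refl _)
  · have h1 : (goWord (c :: rest)).2 = (goWord rest).2 := by
      simp only [goWord]
      rw [if_pos ⟨by simpa using ‹¬ c = ' '›, by simpa using ‹¬ c = '<'›⟩]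
    rw [h1]
    exact Nat.lt_succ_of_le (goWord_len _)

def solution (s : String) : String := String.ofList (goA s.toList)

-- ===== PORT B =====
-- s.find(ch, i) + slicing, as a span over the remaining chars
def spanB (p : Char → Bool) : List Char → List Char × List Char
  | [] => ([], [])
  | c :: rest =>
    if p c then (c :: (spanB p rest).1, (spanB p rest).2)
    else ([], c :: rest)

lemma spanB_len (p : Char → Bool) (l : List Char) : (spanB p l).2.length ≤ l.length := by
  induction l with
  | nil => simp [spanB]
  | cons c r ih =>
    simp only [spanB]
    split
    · exact ih.trans (Nat.le_succ _)
    · simp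

-- seg.split(' ')
def splitSp : List Char → List (List Char)
  | [] => [[]]
  | c :: rest =>
    if c = ' ' then [] :: splitSp rest
    else
      match splitSp rest with
      | [] => [[c]]
      | w :: ws => (c :: w) :: ws

-- ' '.join
def joinSp : List (List Char) → List Char
  | [] => []
  | [w] => w
  | w :: ws => w ++ ' ' :: joinSp ws

-- ' '.join(w[::-1] for w in seg.split(' '))
def revWords (seg : List Char) : List Char := joinSp ((splitSp seg).map List.reverse)

def goB : List Char → List Char
  | [] => []
  | c :: rest =>
    if c = '<' then
      c :: (spanB (fun x => x ≠ '>') rest).1 ++ (spanB (fun x => x ≠ '>') rest).2.take 1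
        ++ goB ((spanB (fun x => x ≠ '>') rest).2.drop 1)
    else
      revWords (c :: (spanB (fun x => x ≠ '<') rest).1) ++ goB ((spanB (fun x => x ≠ '<') rest).2)
termination_by l => l.length
decreasing_by
  · have := spanB_len (fun x => x ≠ '>') rest
    simp only [List.length_cons, List.length_drop]
    omega
  · simp only [List.length_cons]
    exact Nat.lt_succ_of_le (spanB_len _ _)

def solution_alt (s : String) : String := String.ofList (goB s.toList)

-- ===== PRECONDITION & SPEC =====
def Spec_solution (s : String) (out : String) : Prop := out = solution_alt s
instance (s : String) (out : String) : Decidable (Spec_solution s out) := by unfold Spec_solution; infer_instance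

-- ===== CLAIM (what is proved, stated in full; the proofs are below) =====
def Claim_equal_solution : Prop := ∀ (s : String), Dom_solution s → Spec_solution s (solution s)

-- ===== LEMMAS AND PROOFS =====

lemma goTag_eq (l : List Char) (prev : Char) (h : prev ≠ '>') :
    goTag prev l = ((spanB (fun x => x ≠ '>') l).1 ++ (spanB (fun x => x ≠ '>') l).2.take 1,
      (spanB (fun x => x ≠ '>') l).2.drop 1) := by
  induction l generalizing prev with
  | nil => simp [goTag, spanB]
  | cons c r ih =>
    by_cases hc : c = '>'
    · subst hc
      have hgt : goTag '>' r = ([], r) := by cases r <;> simp [goTag]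
      simp [goTag, spanB, h, hgt]
    · simp only [goTag, spanB, if_pos (by simpa using h), if_pos (by simpa using hc : ((c ≠ '>') : Bool) = true)]
      rw [ih c hc]
      simp

lemma spanB_decomp (p : Char → Bool) (l : List Char) :
    (spanB p l).1 ++ (spanB p l).2 = l := by
  induction l with
  | nil => simp [spanB]
  | cons c r ih =>
    simp only [spanB]
    split
    · simpa using ih
    · simp

lemma spanB_mem (p : Char → Bool) (l : List Char) :
    ∀ c ∈ (spanB p l).1, p c = true := by
  induction l with
  | nil => simp [spanB]
  | cons c r ih =>
    simp only [spanB]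
    split
    · intro x hx
      rcases List.mem_cons.mp hx with h | h
      · subst h; assumption
      · exact ih x h
    · simp

lemma spanB_rest (p : Char → Bool) (l : List Char) :
    ∀ c t, (spanB p l).2 = c :: t → p c = false := by
  induction l with
  | nil => simp [spanB]
  | cons c r ih =>
    simp only [spanB]
    split
    · exact ih
    · intro x t hx
      cases hx
      simpa using ‹¬ p c = true›

lemma splitSp_ne_nil (l : List Char) : splitSp l ≠ [] := by
  cases l with
  | nil => simp [splitSp]
  | cons c r =>
    simp only [splitSp]
    split
    · simp
    · split <;> simp

lemma joinSp_nil_cons (ws : List (List Char)) (hws : ws ≠ []) :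
    joinSp ([] :: ws) = ' ' :: joinSp ws := by
  cases ws with
  | nil => exact absurd rfl hws
  | cons w ws' => rfl

lemma revWords_space (rest : List Char) :
    revWords (' ' :: rest) = ' ' :: revWords rest := by
  have h1 : splitSp (' ' :: rest) = [] :: splitSp rest := by simp [splitSp]
  unfold revWords
  rw [h1, List.map_cons, List.reverse_nil,
    joinSp_nil_cons _ (by simpa using splitSp_ne_nil rest)]

lemma splitSp_no_space (u : List Char) (hu : ∀ c ∈ u, c ≠ ' ') :
    splitSp u = [u] := by
  induction u with
  | nil => rfl
  | cons c r ih =>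
    have hc : c ≠ ' ' := hu c (by simp)
    simp only [splitSp, if_neg hc]
    rw [ih (fun x hx => hu x (by simp [hx]))]

lemma splitSp_append_space (u t : List Char) (hu : ∀ c ∈ u, c ≠ ' ') :
    splitSp (u ++ ' ' :: t) = u :: splitSp t := by
  induction u with
  | nil => simp [splitSp]
  | cons c r ih =>
    have hc : c ≠ ' ' := hu c (by simp)
    simp only [List.cons_append, splitSp, if_neg hc]
    rw [ih (fun x hx => hu x (by simp [hx]))]

lemma revWords_word (u r' : List Char) (hu : ∀ c ∈ u, c ≠ ' ')
    (hr : r' = [] ∨ ∃ t, r' = ' ' :: t) :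
    revWords (u ++ r') = u.reverse ++ revWords r' := by
  rcases hr with h | ⟨t, h⟩
  · subst h
    simp [revWords, splitSp_no_space u hu, splitSp, joinSp]
  · subst h
    unfold revWords
    rw [splitSp_append_space u t hu, List.map_cons]
    have hne : (splitSp (' ' :: t)).map List.reverse ≠ [] := by
      simpa using splitSp_ne_nil (' ' :: t)
    have h2 : splitSp (' ' :: t) = [] :: splitSp t := by simp [splitSp]
    rw [h2, List.map_cons, List.reverse_nil,
      joinSp_nil_cons _ (by simpa using splitSp_ne_nil t)]
    cases hws : (splitSp t).map List.reverse with
    | nil => exact absurd hws (by simpa using splitSp_ne_nil t)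
    | cons w ws => simp [joinSp]

lemma goWord_split (seg b : List Char) (h : ∀ c ∈ seg, c ≠ ' ' ∧ c ≠ '<')
    (hb : b = [] ∨ ∃ c t, b = c :: t ∧ (c = ' ' ∨ c = '<')) :
    goWord (seg ++ b) = (seg, b) := by
  induction seg with
  | nil =>
    rcases hb with h1 | ⟨c, t, h1, h2⟩
    · subst h1; rfl
    · subst h1
      simp only [List.nil_append, goWord]
      rw [if_neg]
      rcases h2 with h2 | h2 <;> simp [h2]
  | cons c r ih =>
    simp only [List.cons_append, goWord, if_pos (h c (by simp))]
    rw [ih (fun x hx => h x (by simp [hx]))]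

-- A on a '<'-free segment followed by nothing or a tag = reversed-words of the segment, then A on the rest
lemma goA_seg (n : Nat) : ∀ seg b : List Char, seg.length ≤ n →
    (∀ c ∈ seg, c ≠ '<') → (b = [] ∨ ∃ t, b = '<' :: t) →
    goA (seg ++ b) = revWords seg ++ goA b := by
  induction n with
  | zero =>
    intro seg b hlen _ _
    have : seg = [] := List.eq_nil_of_length_eq_zero (Nat.le_zero.mp hlen)
    subst this
    simp [revWords, splitSp, joinSp]
  | succ n ih =>
    intro seg b hlen hseg hb
    cases seg with
    | nil => simp [revWords, splitSp, joinSp]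
    | cons c rest =>
      by_cases hc : c = ' '
      · subst hc
        have h1 : goA ((' ' :: rest) ++ b) = ' ' :: goA (rest ++ b) := by
          simp [goA]
        rw [h1, ih rest b (by simpa using hlen) (fun x hx => hseg x (by simp [hx])) hb,
          revWords_space]
        simp
      · -- word run
        have hc2 : c ≠ '<' := hseg c (by simp)
        set P : Char → Bool := fun x => decide (x ≠ ' ' ∧ x ≠ '<') with hP
        obtain ⟨w, r', hw⟩ : ∃ w r', spanB P rest = (w, r') := ⟨_, _, rfl⟩
        have hdec : rest = w ++ r' := by rw [← spanB_decomp P rest, hw]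
        have hwmem : ∀ x ∈ w, x ≠ ' ' ∧ x ≠ '<' := by
          intro x hx
          have := spanB_mem P rest x (by rw [hw]; exact hx)
          simpa [hP] using this
        have hr' : r' = [] ∨ ∃ t, r' = ' ' :: t := by
          cases hr : r' with
          | nil => exact Or.inl rfl
          | cons d t =>
            right
            have hd : P d = false := spanB_rest P rest d t (by rw [hw, hr])
            have hdseg : d ≠ '<' := by
              apply hseg
              simp [hdec, hr]
            have : d = ' ' := by
              by_contra hds
              simp [hP, hds, hdseg] at hd
            exact ⟨t, by rw [this]⟩
        have hstop : r' ++ b = [] ∨ ∃ d t, r' ++ b = d :: t ∧ (d = ' ' ∨ d = '<') := by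
          rcases hr' with h1 | ⟨t, h1⟩
          · subst h1
            rcases hb with h2 | ⟨t, h2⟩
            · exact Or.inl (by simp [h2])
            · exact Or.inr ⟨'<', t, by simp [h2], Or.inr rfl⟩
          · exact Or.inr ⟨' ', t ++ b, by simp [h1], Or.inl rfl⟩
        have hword : goWord ((c :: rest) ++ b) = (c :: w, r' ++ b) := by
          have : (c :: rest) ++ b = (c :: w) ++ (r' ++ b) := by simp [hdec]
          rw [this]
          exact goWord_split (c :: w) (r' ++ b)
            (by intro x hx
                rcases List.mem_cons.mp hx with h1 | h1
                · exact h1 ▸ ⟨hc, hc2⟩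
                · exact hwmem x h1) hstop
        have hA : goA ((c :: rest) ++ b) =
            (c :: w).reverse ++ goA (r' ++ b) := by
          rw [show (c :: rest) ++ b = c :: (rest ++ b) from rfl]
          rw [goA, if_neg hc2, if_neg hc]
          rw [show c :: (rest ++ b) = (c :: rest) ++ b from rfl, hword]
        rw [hA]
        have hr'len : r'.length ≤ n := by
          have : w.length + r'.length = rest.length := by
            rw [hdec]; simp
          have hr : rest.length ≤ n := by simpa using hlen
          omega
        rw [ih r' b hr'len
          (by intro x hx
              apply hseg
              simp [hdec, hx]) hb]
        have : revWords (c :: rest) = (c :: w).reverse ++ revWords r' := by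
          rw [show c :: rest = (c :: w) ++ r' from by simp [hdec]]
          exact revWords_word (c :: w) r'
            (by intro x hx
                rcases List.mem_cons.mp hx with h1 | h1
                · exact h1 ▸ hc
                · exact (hwmem x h1).1) hr'
        rw [this, List.append_assoc]

lemma goA_eq_goB_fuel (n : Nat) : ∀ l : List Char, l.length ≤ n → goA l = goB l := by
  induction n with
  | zero =>
    intro l hl
    have : l = [] := List.eq_nil_of_length_eq_zero (Nat.le_zero.mp hl)
    subst this
    simp [goA, goB]
  | succ n ih =>
    intro l hl
    cases l with
    | nil => simp [goA, goB]
    | cons c rest =>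
      by_cases hc : c = '<'
      · subst hc
        have hT := goTag_eq rest '<' (by decide)
        have hdlen : ((spanB (fun x => x ≠ '>') rest).2.drop 1).length ≤ n := by
          have h2 := spanB_len (fun x => x ≠ '>') rest
          simp only [List.length_cons] at hl
          simp only [List.length_drop]
          omega
        rw [goA, if_pos rfl, hT, goB, if_pos rfl, ih _ hdlen]
        simp
      · obtain ⟨a, b, hsp⟩ : ∃ a b, spanB (fun x => x ≠ '<') rest = (a, b) := ⟨_, _, rfl⟩
        have hdec : rest = a ++ b := by rw [← spanB_decomp (fun x => x ≠ '<') rest, hsp]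
        have hseg : ∀ x ∈ c :: a, x ≠ '<' := by
          intro x hx
          rcases List.mem_cons.mp hx with h1 | h1
          · exact h1 ▸ hc
          · have := spanB_mem (fun x => x ≠ '<') rest x (by rw [hsp]; exact h1)
            simpa using this
        have hb : b = [] ∨ ∃ t, b = '<' :: t := by
          cases hbc : b with
          | nil => exact Or.inl rfl
          | cons d t =>
            have := spanB_rest (fun x => x ≠ '<') rest d t (by rw [hsp, hbc])
            right
            exact ⟨t, by simp at this; rw [this]⟩
        have h1 : goA (c :: rest) = revWords (c :: a) ++ goA b := by
          rw [show c :: rest = (c :: a) ++ b from by simp [hdec]]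
          exact goA_seg (c :: a).length (c :: a) b le_rfl hseg hb
        have hblen : b.length ≤ n := by
          have : a.length + b.length = rest.length := by rw [hdec]; simp
          simp at hl
          omega
        rw [h1, ih b hblen, goB, if_neg hc, hsp]

lemma goA_eq_goB (l : List Char) : goA l = goB l :=
  goA_eq_goB_fuel l.length l le_rfl

-- ===== VERDICT (by name: the statement is the Claim_ definition above) =====
theorem solution_spec : Claim_equal_solution := by
  intro s _
  show solution s = solution_alt s
  simp [solution, solution_alt, goA_eq_goB]
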